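-- pv_equiv track=rewrite | github.com/SG17THEProgrammer/BeyondChats-Article-Scraper-Rewriter | backend/scraper/scrape.py | clean_article_content
-- ===== SOURCE A (Python) =====
-- STOP_PHRASES = [
--     "Leave a Reply",
--     "More from",
--     "Share on",
--     "BeyondChats 20",
--     "Why BeyondChats",
--     "All rights reserved",
--     "Save my name",
--     "Post Comment"
-- ]
--
-- REMOVE_LINE_KEYWORDS = [
--     "LinkedIn",
--     "Instagram",
--     "Twitter",
--     "RESOURCES",
--     "Pricing",
--     "Products",
--     "Features",
--     "Integrations",
--     "Contact Us",
--     "About Us",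
--     "FAQs",
--     "Startup",
--     "Standard",
--     "Business",
--     "Enterprise"
-- ]
--
-- def clean_article_content(raw_content):
--     cleaned_lines = []
--
--     for line in raw_content.split("\n"):
--         line = line.strip()
--
--         if any(stop in line for stop in STOP_PHRASES):
--             break
--
--         if not line:
--             continue
--
--         if any(word in line for word in REMOVE_LINE_KEYWORDS):
--             continue
--
--         if line.lower().startswith(("- ritika", "- december", "- chatbots")):
--             continue
--
--         cleaned_lines.append(line)
--
--     return "\n".join(cleaned_lines)
-- ===== SOURCE B (Python) =====
-- STOP_PHRASES = (
--     "Leave a Reply/More from/Share on/BeyondChats 20/Why BeyondChats/"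
--     "All rights reserved/Save my name/Post Comment"
-- ).split("/")
--
-- REMOVE_LINE_KEYWORDS = (
--     "LinkedIn/Instagram/Twitter/RESOURCES/Pricing/Products/Features/"
--     "Integrations/Contact Us/About Us/FAQs/Startup/Standard/Business/Enterprise"
-- ).split("/")
--
--
-- def clean_article_content(raw_content):
--     # Cursor scan: carve one line at a time off the front with str.find,
--     # append kept lines straight into the output string; no line list is built.
--     out = None
--     rest = raw_content
--     while True:
--         nl = rest.find("\n")
--         line = (rest if nl == -1 else rest[:nl]).strip()
--         if any(stop in line for stop in STOP_PHRASES):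
--             break
--         if line \
--                 and not any(word in line for word in REMOVE_LINE_KEYWORDS) \
--                 and not line.lower().startswith(("- ritika", "- december", "- chatbots")):
--             out = line if out is None else out + "\n" + line
--         if nl == -1:
--             break
--         rest = rest[nl + 1:]
--     return out if out is not None else ""
-- ===== Notes on version B (the rewrite author's own statement) =====
-- stated objective: alternative
-- what changed: Replaces split-into-a-line-list plus a break/continue loop with a cursor scan: str.find carves one line at a time off the front of the remaining text and kept lines are appended straight into the output string, so no line list and no joined list are ever built.
import Mathlib
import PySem

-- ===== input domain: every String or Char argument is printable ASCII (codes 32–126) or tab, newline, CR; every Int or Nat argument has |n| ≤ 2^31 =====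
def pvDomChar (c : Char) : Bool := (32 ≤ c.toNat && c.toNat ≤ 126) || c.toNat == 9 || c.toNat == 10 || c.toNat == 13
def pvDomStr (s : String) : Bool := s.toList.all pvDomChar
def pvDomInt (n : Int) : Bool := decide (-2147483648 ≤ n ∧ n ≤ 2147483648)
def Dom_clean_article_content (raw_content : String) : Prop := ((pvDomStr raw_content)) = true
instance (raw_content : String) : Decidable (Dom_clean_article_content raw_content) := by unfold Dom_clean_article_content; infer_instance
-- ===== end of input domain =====

-- B replaces A's split-into-a-line-list + break/continue loop with a cursor scan (str.find carves
-- one line at a time, kept lines are appended straight into the output string); objective: alternative.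

def STOP_PHRASES : List String :=
  ["Leave a Reply", "More from", "Share on", "BeyondChats 20", "Why BeyondChats",
   "All rights reserved", "Save my name", "Post Comment"]

def REMOVE_LINE_KEYWORDS : List String :=
  ["LinkedIn", "Instagram", "Twitter", "RESOURCES", "Pricing", "Products", "Features",
   "Integrations", "Contact Us", "About Us", "FAQs", "Startup", "Standard", "Business", "Enterprise"]

-- ===== PORT A =====
-- A's loop: strip each line, BREAK at a stop phrase, skip empty / keyword / blocked-prefix lines, append otherwise.
def cleanLoopA : List String → List String
  | [] => []
  | l :: rest =>
    let line := PySem.Str.strip l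
    if STOP_PHRASES.any (fun stop => PySem.Str.isIn stop line) then []
    else if line == "" then cleanLoopA rest
    else if REMOVE_LINE_KEYWORDS.any (fun word => PySem.Str.isIn word line) then cleanLoopA rest
    else if PySem.Str.startswith (PySem.Str.lower line) "- ritika" ||
            PySem.Str.startswith (PySem.Str.lower line) "- december" ||
            PySem.Str.startswith (PySem.Str.lower line) "- chatbots" then cleanLoopA rest
    else line :: cleanLoopA rest

def clean_article_content (raw_content : String) : String :=
  PySem.Str.join "\n" (cleanLoopA ((PySem.Str.split? raw_content "\n").getD []))

-- ===== PORT B =====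
-- Source B's while-loop, transcribed on the character list (PySem strings are proved on the List Char
-- side): out is the Option-string accumulator, rest the not-yet-scanned suffix; find/slice are
-- Python's str.find / slicing via PySem.Chars.
def STOP_PHRASES_B : List String :=
  (PySem.Str.split?
    ("Leave a Reply/More from/Share on/BeyondChats 20/Why BeyondChats/" ++
     "All rights reserved/Save my name/Post Comment") "/").getD []

def REMOVE_LINE_KEYWORDS_B : List String :=
  (PySem.Str.split?
    ("LinkedIn/Instagram/Twitter/RESOURCES/Pricing/Products/Features/" ++
     "Integrations/Contact Us/About Us/FAQs/Startup/Standard/Business/Enterprise") "/").getD []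

def cleanScanB (out : Option (List Char)) (rest : List Char) : Option (List Char) :=
  let nl := PySem.Chars.find rest ['\n']
  let line := PySem.Chars.strip (if nl = -1 then rest else PySem.Chars.slice rest none (some nl))
  if STOP_PHRASES_B.any (fun stop => PySem.Chars.isIn stop.toList line) then out
  else
    let out' :=
      if line ≠ [] ∧
         ¬ REMOVE_LINE_KEYWORDS_B.any (fun word => PySem.Chars.isIn word.toList line) = true ∧
         ¬ (PySem.Chars.startswith (PySem.Chars.lower line) "- ritika".toList ||
            PySem.Chars.startswith (PySem.Chars.lower line) "- december".toList ||
            PySem.Chars.startswith (PySem.Chars.lower line) "- chatbots".toList) = true then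
        some (match out with | none => line | some o => o ++ '\n' :: line)
      else out
    if h : nl = -1 then out'
    else cleanScanB out' (PySem.Chars.slice rest (some (nl + 1)) none)
termination_by rest.length
decreasing_by
  have h0 : (0:Int) ≤ PySem.Chars.find rest ['\n'] := by
    rcases lt_or_eq_of_le (PySem.Chars.neg_one_le_find rest ['\n']) with h1 | h1
    · omega
    · exact absurd h1.symm h
  have h2 := (PySem.Chars.find_spec (s := rest) (sub := ['\n']) h0).1
  have h3 : (PySem.Chars.find rest ['\n']).toNat < rest.length := by
    by_contra hc
    rw [List.drop_eq_nil_of_le (by omega)] at h2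
    simp at h2
  rw [PySem.Chars.slice, PySem.List.slice_from _ (by omega)]
  simp only [List.length_drop]
  omega

def clean_article_content_alt (raw_content : String) : String :=
  String.ofList ((cleanScanB none raw_content.toList).getD [])

-- ===== PRECONDITION & SPEC =====
def Spec_clean_article_content (raw_content : String) (out : String) : Prop := out = clean_article_content_alt raw_content
instance (raw_content : String) (out : String) : Decidable (Spec_clean_article_content raw_content out) := by unfold Spec_clean_article_content; infer_instance

-- ===== CLAIM (what is proved, stated in full; the proofs are below) =====
def Claim_equal_clean_article_content : Prop := ∀ (raw_content : String), Dom_clean_article_content raw_content → Spec_clean_article_content raw_content (clean_article_content raw_content)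

-- ===== LEMMAS AND PROOFS =====

-- Char-level predicates shared by the two characterizations.
def pStop (l : List Char) : Bool := STOP_PHRASES.any (fun s => PySem.Chars.isIn s.toList l)
def pKeep (l : List Char) : Bool :=
  !(l.isEmpty) &&
  !(REMOVE_LINE_KEYWORDS.any (fun w => PySem.Chars.isIn w.toList l)) &&
  !(PySem.Chars.startswith (PySem.Chars.lower l) "- ritika".toList ||
    PySem.Chars.startswith (PySem.Chars.lower l) "- december".toList ||
    PySem.Chars.startswith (PySem.Chars.lower l) "- chatbots".toList)

-- Structural version of s.split("\n").
def linesOf : List Char → List (List Char)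
  | [] => [[]]
  | c :: rest => if c = '\n' then [] :: linesOf rest else (linesOf rest).modifyHead (c :: ·)

def kept (ls : List (List Char)) : List (List Char) :=
  ((ls.map PySem.Chars.strip).takeWhile (fun l => !pStop l)).filter pKeep

def finish : Option (List Char) → List (List Char) → Option (List Char)
  | out, [] => out
  | out, l :: ls => finish (some (match out with | none => l | some o => o ++ '\n' :: l)) ls

lemma linesOf_ne_nil (l : List Char) : linesOf l ≠ [] := by
  induction l with
  | nil => simp [linesOf]
  | cons c rest ih =>
    simp only [linesOf]
    split
    · simp
    · cases h : linesOf rest with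
      | nil => exact absurd h ih
      | cons x xs => simp [List.modifyHead]

lemma splitOn_go_spec : ∀ (fuel : Nat) (l cur : List Char) (acc : List (List Char)),
    l.length ≤ fuel →
    PySem.Chars.splitOn.go ['\n'] fuel l cur acc =
      acc.reverse ++ (linesOf l).modifyHead (cur.reverse ++ ·) := by
  intro fuel
  induction fuel with
  | zero =>
    intro l cur acc hl
    have : l = [] := List.eq_nil_of_length_eq_zero (by omega)
    subst this
    simp [PySem.Chars.splitOn.go, linesOf, List.modifyHead]
  | succ fuel ih =>
    intro l cur acc hl
    cases l with
    | nil => simp [PySem.Chars.splitOn.go, linesOf, List.modifyHead]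
    | cons c rest =>
      simp only [PySem.Chars.splitOn.go]
      by_cases hc : c = '\n'
      · subst hc
        rw [if_pos (by simp [List.isPrefixOf])]
        rw [show List.drop (['\n'] : List Char).length ('\n' :: rest) = rest from rfl]
        rw [ih rest [] (cur.reverse :: acc) (by simpa using hl)]
        simp only [linesOf, List.reverse_cons, List.append_assoc,
          List.singleton_append, List.reverse_nil, List.nil_append]
        cases linesOf rest <;> simp
      · rw [if_neg (by simp [List.isPrefixOf]; exact fun h => hc h.symm)]
        rw [ih rest (c :: cur) acc (by simpa using hl)]
        simp only [linesOf, if_neg hc]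
        congr 1
        cases h : linesOf rest with
        | nil => exact absurd h (linesOf_ne_nil rest)
        | cons x xs => simp [List.modifyHead]

lemma splitOn_eq_linesOf (s : List Char) : PySem.Chars.splitOn s ['\n'] = linesOf s := by
  rw [PySem.Chars.splitOn, splitOn_go_spec (s.length + 1) s [] [] (by omega)]
  simp only [List.reverse_nil, List.nil_append]
  cases h : linesOf s with
  | nil => exact absurd h (linesOf_ne_nil s)
  | cons x xs => simp [List.modifyHead]

-- Char-level transcription of A's loop.
def charClean : List (List Char) → List (List Char)
  | [] => []
  | l :: rest =>
    let line := PySem.Chars.strip l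
    if pStop line then []
    else if line.isEmpty then charClean rest
    else if REMOVE_LINE_KEYWORDS.any (fun w => PySem.Chars.isIn w.toList line) then charClean rest
    else if PySem.Chars.startswith (PySem.Chars.lower line) "- ritika".toList ||
            PySem.Chars.startswith (PySem.Chars.lower line) "- december".toList ||
            PySem.Chars.startswith (PySem.Chars.lower line) "- chatbots".toList then charClean rest
    else line :: charClean rest

lemma cleanLoopA_toList (lines : List String) :
    (cleanLoopA lines).map String.toList = charClean (lines.map String.toList) := by
  induction lines with
  | nil => rfl
  | cons l rest ih =>
    simp only [cleanLoopA, charClean, List.map_cons]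
    have hstrip : (PySem.Str.strip l).toList = PySem.Chars.strip l.toList := PySem.Str.toList_strip l
    have hstop : (STOP_PHRASES.any (fun stop => PySem.Str.isIn stop (PySem.Str.strip l)))
        = pStop (PySem.Chars.strip l.toList) := by
      simp [pStop, PySem.Str.isIn_eq, hstrip]
    have hempty : (PySem.Str.strip l == "") = (PySem.Chars.strip l.toList).isEmpty := by
      by_cases h : PySem.Str.strip l = ""
      · have h2 : (PySem.Chars.strip l.toList) = [] := by rw [← hstrip, h]; rfl
        simp [h, h2]
      · have h2 : (PySem.Chars.strip l.toList) ≠ [] := by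
          rw [← hstrip]
          exact fun hh => h (String.toList_eq_nil_iff.mp hh)
        have hL : (PySem.Str.strip l == "") = false := beq_eq_false_iff_ne.mpr h
        have hR : (PySem.Chars.strip l.toList).isEmpty = false := by simpa using h2
        rw [hL, hR]
    have hrem : (REMOVE_LINE_KEYWORDS.any (fun word => PySem.Str.isIn word (PySem.Str.strip l)))
        = (REMOVE_LINE_KEYWORDS.any (fun w => PySem.Chars.isIn w.toList (PySem.Chars.strip l.toList))) := by
      simp [PySem.Str.isIn_eq, hstrip]
    have hlow : (PySem.Str.lower (PySem.Str.strip l)).toList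
        = PySem.Chars.lower (PySem.Chars.strip l.toList) := by
      rw [PySem.Str.toList_lower, hstrip]
    have hpre : ∀ p : String,
        PySem.Str.startswith (PySem.Str.lower (PySem.Str.strip l)) p
        = PySem.Chars.startswith (PySem.Chars.lower (PySem.Chars.strip l.toList)) p.toList := by
      intro p; rw [PySem.Str.startswith_eq, hlow]
    rw [hstop]
    split
    · simp
    · rw [hempty]
      split
      · exact ih
      · rw [hrem]
        split
        · exact ih
        · rw [hpre "- ritika", hpre "- december", hpre "- chatbots"]
          split
          · exact ih
          · simp only [List.map_cons, hstrip, ih]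

lemma charClean_eq_kept (ls : List (List Char)) : charClean ls = kept ls := by
  induction ls with
  | nil => rfl
  | cons l rest ih =>
    simp only [charClean, kept, List.map_cons, List.takeWhile_cons]
    cases hstop : pStop (PySem.Chars.strip l) with
    | true => simp
    | false =>
      simp only [Bool.not_false, if_true, List.filter_cons]
      by_cases hemp : (PySem.Chars.strip l).isEmpty
      · have : pKeep (PySem.Chars.strip l) = false := by simp [pKeep, hemp]
        simp [hemp, this, ih, kept]
      · simp only [Bool.not_eq_true] at hemp
        rw [hemp]
        cases hrem : (REMOVE_LINE_KEYWORDS.any (fun w => PySem.Chars.isIn w.toList (PySem.Chars.strip l))) with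
        | true =>
          have : pKeep (PySem.Chars.strip l) = false := by simp [pKeep, hrem]
          simp [this, ih, kept]
        | false =>
          cases hpre : (PySem.Chars.startswith (PySem.Chars.lower (PySem.Chars.strip l)) "- ritika".toList ||
              PySem.Chars.startswith (PySem.Chars.lower (PySem.Chars.strip l)) "- december".toList ||
              PySem.Chars.startswith (PySem.Chars.lower (PySem.Chars.strip l)) "- chatbots".toList) with
          | true =>
            have hk : pKeep (PySem.Chars.strip l) = false := by
              unfold pKeep; rw [hpre]; simp
            simp [hk, ih, kept]
          | false =>
            have hk : pKeep (PySem.Chars.strip l) = true := by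
              unfold pKeep; rw [hemp, hrem, hpre]; rfl
            simp [hk, ih, kept]

lemma linesOf_no_newline {l : List Char} (h : '\n' ∉ l) : linesOf l = [l] := by
  induction l with
  | nil => rfl
  | cons c rest ih =>
    have hc : c ≠ '\n' := fun hc => h (hc ▸ List.mem_cons_self ..)
    have hr : '\n' ∉ rest := fun hr => h (List.mem_cons_of_mem _ hr)
    simp [linesOf, hc, ih hr, List.modifyHead]

lemma linesOf_append {pre : List Char} (suf : List Char) (h : '\n' ∉ pre) :
    linesOf (pre ++ '\n' :: suf) = pre :: linesOf suf := by
  induction pre with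
  | nil => simp [linesOf]
  | cons c rest ih =>
    have hc : c ≠ '\n' := fun hc => h (hc ▸ List.mem_cons_self ..)
    have hr : '\n' ∉ rest := fun hr => h (List.mem_cons_of_mem _ hr)
    simp only [List.cons_append, linesOf, if_neg hc, ih hr, List.modifyHead]

set_option maxRecDepth 8192 in
lemma stopB_eq : STOP_PHRASES_B = STOP_PHRASES := rfl

set_option maxRecDepth 8192 in
lemma removeB_eq : REMOVE_LINE_KEYWORDS_B = REMOVE_LINE_KEYWORDS := rfl

lemma pKeep_iff (l : List Char) : pKeep l = true ↔
    (l ≠ [] ∧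
     ¬ REMOVE_LINE_KEYWORDS.any (fun word => PySem.Chars.isIn word.toList l) = true ∧
     ¬ (PySem.Chars.startswith (PySem.Chars.lower l) "- ritika".toList ||
        PySem.Chars.startswith (PySem.Chars.lower l) "- december".toList ||
        PySem.Chars.startswith (PySem.Chars.lower l) "- chatbots".toList) = true) := by
  unfold pKeep
  simp [and_assoc]

lemma kept_cons (l : List Char) (ls : List (List Char)) :
    kept (l :: ls) =
      if pStop (PySem.Chars.strip l) then []
      else if pKeep (PySem.Chars.strip l) then PySem.Chars.strip l :: kept ls else kept ls := by
  simp only [kept, List.map_cons, List.takeWhile_cons]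
  cases hstop : pStop (PySem.Chars.strip l) with
  | true => simp
  | false => cases hk : pKeep (PySem.Chars.strip l) <;> simp [hk]

lemma singleton_infix_mem {c : Char} {l : List Char} (h : c ∈ l) : [c] <:+: l := by
  obtain ⟨pre, suf, h2, -⟩ := List.eq_append_cons_of_mem h
  exact ⟨pre, suf, by rw [h2]; simp⟩

set_option maxRecDepth 8192 in
lemma scanB_spec : ∀ (rest : List Char) (out : Option (List Char)),
    cleanScanB out rest = finish out (kept (linesOf rest)) := by
  intro rest
  induction hn : rest.length using Nat.strong_induction_on generalizing rest with
  | _ n ih =>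
  intro out
  subst hn
  rw [cleanScanB.eq_def]
  simp only [stopB_eq, removeB_eq]
  by_cases h1 : PySem.Chars.find rest ['\n'] = -1
  · -- no newline in rest: last iteration
    have hmem : '\n' ∉ rest := by
      intro hm
      exact (PySem.Chars.find_eq_neg_one_iff rest ['\n']).mp h1 (singleton_infix_mem hm)
    rw [linesOf_no_newline hmem, kept_cons]
    have hstopeq : (STOP_PHRASES.any fun stop => PySem.Chars.isIn stop.toList (PySem.Chars.strip rest))
        = pStop (PySem.Chars.strip rest) := rfl
    simp only [if_pos h1, dif_pos h1, hstopeq]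
    cases hstop : pStop (PySem.Chars.strip rest) with
    | true => simp [finish]
    | false =>
      simp only [Bool.false_eq_true, if_false]
      by_cases hk : pKeep (PySem.Chars.strip rest) = true
      · rw [if_pos ((pKeep_iff _).mp hk), if_pos hk]
        cases out <;> rfl
      · rw [if_neg (fun hc => hk ((pKeep_iff _).mpr hc)), if_neg hk]
        rfl
  · -- newline found at index k
    have h0 : (0:Int) ≤ PySem.Chars.find rest ['\n'] := by
      rcases lt_or_eq_of_le (PySem.Chars.neg_one_le_find rest ['\n']) with h | h
      · omega
      · exact absurd h.symm h1
    obtain ⟨hpre, hmin⟩ := PySem.Chars.find_spec h0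
    set k := (PySem.Chars.find rest ['\n']).toNat with hkdef
    have hklen : k < rest.length := by
      have h2 := hpre.length_le
      simp only [List.length_drop, List.length_cons, List.length_nil] at h2
      omega
    have hdropk : rest.drop k = '\n' :: rest.drop (k + 1) := by
      obtain ⟨t, ht⟩ := hpre
      have htail : rest.drop (k + 1) = t := by
        rw [← List.tail_drop, ← ht]
        rfl
      rw [← ht, htail]
      rfl
    have hprenl : '\n' ∉ rest.take k := by
      intro hm
      obtain ⟨i, hi, hgi⟩ := List.getElem_of_mem hm
      have hik : i < k := by
        have := hi
        simp [List.length_take] at this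
        omega
      apply hmin i hik
      have higet : rest[i]'(by omega) = '\n' := by
        rw [← hgi]
        simp [List.getElem_take]
      refine ⟨rest.drop (i + 1), ?_⟩
      rw [← higet]
      exact (List.drop_eq_getElem_cons (by omega)).symm
    have hsplitrest : linesOf rest = rest.take k :: linesOf (rest.drop (k + 1)) := by
      conv_lhs => rw [← List.take_append_drop k rest, hdropk]
      exact linesOf_append _ hprenl
    have hslice1 : PySem.Chars.slice rest none (some (PySem.Chars.find rest ['\n'])) = rest.take k := by
      rw [PySem.Chars.slice, PySem.List.slice_to _ h0]
    have hslice2 : PySem.Chars.slice rest (some (PySem.Chars.find rest ['\n'] + 1)) none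
        = rest.drop (k + 1) := by
      rw [PySem.Chars.slice, PySem.List.slice_from _ (by omega)]
      congr 1
      omega
    rw [hsplitrest, kept_cons]
    have hstopeq : (STOP_PHRASES.any fun stop => PySem.Chars.isIn stop.toList (PySem.Chars.strip (rest.take k)))
        = pStop (PySem.Chars.strip (rest.take k)) := rfl
    simp only [if_neg h1, dif_neg h1, hslice1, hslice2, hstopeq]
    have ihcall := fun out' => ih (rest.drop (k + 1)).length
      (by simp only [List.length_drop]; omega) (rest.drop (k + 1)) rfl out'
    cases hstop : pStop (PySem.Chars.strip (rest.take k)) with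
    | true => simp [finish]
    | false =>
      simp only [Bool.false_eq_true, if_false]
      by_cases hk : pKeep (PySem.Chars.strip (rest.take k)) = true
      · rw [if_pos ((pKeep_iff _).mp hk), if_pos hk, ihcall]
        cases out <;> rfl
      · rw [if_neg (fun hc => hk ((pKeep_iff _).mpr hc)), if_neg hk]
        exact ihcall out

lemma finish_some (ls : List (List Char)) : ∀ o, finish (some o) ls = some (o ++ ls.flatMap (fun x => '\n' :: x)) := by
  induction ls with
  | nil => intro o; simp [finish]
  | cons l rest ih => intro o; simp [finish, ih, List.flatMap_cons, List.append_assoc]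

lemma intercalate_newline_cons (l : List Char) (ls : List (List Char)) :
    List.intercalate ['\n'] (l :: ls) = l ++ ls.flatMap (fun x => '\n' :: x) := by
  induction ls generalizing l with
  | nil => simp [List.intercalate]
  | cons m ms ih =>
    have hstep : List.intercalate ['\n'] (l :: m :: ms)
        = l ++ ['\n'] ++ List.intercalate ['\n'] (m :: ms) := by
      simp [List.intercalate, List.intersperse]
    rw [hstep, ih]
    simp

lemma finish_none_join (ls : List (List Char)) :
    (finish none ls).getD [] = PySem.Chars.join ['\n'] ls := by
  cases ls with
  | nil => simp [finish, PySem.Chars.join, List.intercalate]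
  | cons l rest =>
    rw [show finish none (l :: rest) = finish (some l) rest from rfl, finish_some]
    simp only [Option.getD_some, PySem.Chars.join, intercalate_newline_cons]

-- ===== VERDICT (by name: the statement is the Claim_ definition above) =====
theorem clean_article_content_spec : Claim_equal_clean_article_content := by
  intro raw _
  unfold Spec_clean_article_content clean_article_content clean_article_content_alt
  have hsplit : (PySem.Str.split? raw "\n").getD [] = (linesOf raw.toList).map String.ofList := by
    simp [PySem.Str.split?, PySem.Chars.split?, splitOn_eq_linesOf]
  rw [hsplit, scanB_spec, finish_none_join]
  have hA : (cleanLoopA ((linesOf raw.toList).map String.ofList)).map String.toList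
      = kept (linesOf raw.toList) := by
    rw [cleanLoopA_toList, ← charClean_eq_kept]
    congr 1
    simp only [List.map_map, Function.comp_def, String.toList_ofList, List.map_id']
  rw [PySem.Str.join, show ("\n" : String).toList = ['\n'] from rfl, hA]
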